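-- pv_equiv track=rewrite | github.com/ayushsingh0002a-wq/Big- | app.py | detect_streak
-- ===== SOURCE A (Python) =====
-- def classify(num):
--     return "SMALL" if num <= 4 else "BIG"
--
-- def detect_streak(numbers):
--     if not numbers:
--         return None, 0
--
--     last_type = classify(numbers[-1])
--     streak = 1
--
--     for i in range(len(numbers) - 2, -1, -1):
--         if classify(numbers[i]) == last_type:
--             streak += 1
--         else:
--             break
--
--     return last_type, streak
-- ===== SOURCE B (Python) =====
-- def classify(num):
--     return "SMALL" if num <= 4 else "BIG"
--
-- def detect_streak(numbers):
--     # Forward pass: run-length-encode the classifications, then return the last run.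
--     groups = []
--     for num in numbers:
--         k = classify(num)
--         if groups and groups[-1][0] == k:
--             groups[-1] = (k, groups[-1][1] + 1)
--         else:
--             groups.append((k, 1))
--     if not groups:
--         return None, 0
--     return groups[-1]
-- ===== Notes on version B (the rewrite author's own statement) =====
-- stated objective: alternative
-- what changed: A scans backwards over indices from the end with an early break; B makes one forward pass that run-length-encodes the SMALL/BIG classifications and returns the last run.
import Mathlib
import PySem

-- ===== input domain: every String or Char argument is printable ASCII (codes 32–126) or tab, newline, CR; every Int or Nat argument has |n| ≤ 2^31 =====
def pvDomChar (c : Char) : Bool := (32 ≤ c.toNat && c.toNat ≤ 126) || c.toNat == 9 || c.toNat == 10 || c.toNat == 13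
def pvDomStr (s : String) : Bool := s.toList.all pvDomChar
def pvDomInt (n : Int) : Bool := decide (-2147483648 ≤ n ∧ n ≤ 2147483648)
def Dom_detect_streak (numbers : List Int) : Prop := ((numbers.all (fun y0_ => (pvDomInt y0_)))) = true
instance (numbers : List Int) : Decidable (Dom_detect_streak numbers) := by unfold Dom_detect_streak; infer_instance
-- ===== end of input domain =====

-- A scans backwards from the end with an early break; B makes one forward pass that run-length-encodes
-- the SMALL/BIG classifications and returns the last run (objective: alternative traversal, same result).


-- ===== PORT A =====
def classify (num : Int) : String := if num ≤ 4 then "SMALL" else "BIG"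

-- A's backward index loop with break; every visited index is in range, so pyGet?'s default is never used.
def aLoop (numbers : List Int) (lastType : String) : List Int → Int → Int
  | [], streak => streak
  | i :: rest, streak =>
    if classify ((PySem.List.pyGet? numbers i).getD 0) = lastType then
      aLoop numbers lastType rest (streak + 1)
    else streak

def detect_streak (numbers : List Int) : Option String × Int :=
  if numbers.isEmpty then (none, 0)
  else
    -- numbers[-1]: the list is nonempty here, so the access succeeds (getD default never used)
    let lastType := classify ((PySem.List.pyGet? numbers (-1)).getD 0)
    let streak := aLoop numbers lastType
      (PySem.List.pyRange ((numbers.length : Int) - 2) (-1) (-1)) 1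
    (some lastType, streak)

-- ===== PORT B =====
-- one step of Source B's loop: extend the last group or append a new one
def bStep (groups : List (String × Int)) (num : Int) : List (String × Int) :=
  let k := classify num
  match groups.getLast? with
  | some (k', c) => if k' = k then groups.dropLast ++ [(k, c + 1)] else groups ++ [(k, 1)]
  | none => groups ++ [(k, 1)]

def detect_streak_alt (numbers : List Int) : Option String × Int :=
  match (numbers.foldl bStep []).getLast? with
  | none => (none, 0)
  | some (k, c) => (some k, c)

-- ===== PRECONDITION & SPEC =====
def Spec_detect_streak (numbers : List Int) (out : Option String × Int) : Prop := out = detect_streak_alt numbers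
instance (numbers : List Int) (out : Option String × Int) : Decidable (Spec_detect_streak numbers out) := by unfold Spec_detect_streak; infer_instance

-- ===== CLAIM (what is proved, stated in full; the proofs are below) =====
def Claim_equal_detect_streak : Prop := ∀ (numbers : List Int), Dom_detect_streak numbers → Spec_detect_streak numbers (detect_streak numbers)

-- ===== LEMMAS AND PROOFS =====

-- the common characterisation: classification of the last element, and length of the trailing run
def tailRunOpt (xs : List Int) : Option (String × Int) :=
  match xs.reverse with
  | [] => none
  | y :: t => some (classify y, 1 + ((t.takeWhile fun z => classify z == classify y).length : Int))

theorem aLoop_spec (t : List Int) :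
    ∀ (extra : List Int) (lt : String) (s : Int),
      aLoop (t.reverse ++ extra) lt (PySem.List.pyRange ((t.length : Int) - 1) (-1) (-1)) s
        = s + ((t.takeWhile fun z => classify z == lt).length : Int) := by
  induction t with
  | nil =>
    intro extra lt s
    rw [PySem.List.pyRange_neg_one_eq_nil (by simp)]
    simp [aLoop]
  | cons a t' ih =>
    intro extra lt s
    have hlen : ((a :: t').length : Int) - 1 = (t'.length : Int) := by simp
    rw [hlen, PySem.List.pyRange_neg_one_cons (by omega)]
    have hrw : (a :: t').reverse ++ extra = t'.reverse ++ (a :: extra) := by simp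
    rw [hrw]
    have hget : PySem.List.pyGet? (t'.reverse ++ (a :: extra)) (t'.length : Int) = some a := by
      have h := PySem.List.pyGet?_append_length (pre := t'.reverse) (y := a) (ys := extra)
      simp only [List.length_reverse] at h
      exact h
    unfold aLoop
    rw [hget]
    simp only [Option.getD_some]
    by_cases hc : classify a = lt
    · rw [if_pos hc, ih (a :: extra) lt (s + 1),
        List.takeWhile_cons_of_pos (by simp [hc])]
      simp only [List.length_cons]
      push_cast
      ring
    · rw [if_neg hc, List.takeWhile_cons_of_neg (by simp [hc])]
      simp

theorem bStep_getLast_none (g : List (String × Int)) (y : Int) (h : g.getLast? = none) :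
    (bStep g y).getLast? = some (classify y, 1) := by
  unfold bStep
  rw [h]
  show (g ++ [(classify y, 1)]).getLast? = some (classify y, 1)
  simp

theorem bStep_getLast_some (g : List (String × Int)) (y : Int) (k' : String) (c : Int)
    (h : g.getLast? = some (k', c)) :
    (bStep g y).getLast?
      = if k' = classify y then some (classify y, c + 1) else some (classify y, 1) := by
  unfold bStep
  rw [h]
  show (if k' = classify y then g.dropLast ++ [(classify y, c + 1)] else g ++ [(classify y, 1)]).getLast?
      = if k' = classify y then some (classify y, c + 1) else some (classify y, 1)
  by_cases h1 : k' = classify y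
  · rw [if_pos h1, if_pos h1]
    simp
  · rw [if_neg h1, if_neg h1]
    simp

theorem bFold_spec (xs : List Int) : (xs.foldl bStep []).getLast? = tailRunOpt xs := by
  induction xs using List.reverseRecOn with
  | nil => simp [tailRunOpt]
  | append_singleton t y ih =>
    rw [List.foldl_append]
    simp only [List.foldl_cons, List.foldl_nil]
    cases ht : (t.foldl bStep []).getLast? with
    | none =>
      have htail : tailRunOpt t = none := by rw [← ih, ht]
      have htnil : t = [] := by
        unfold tailRunOpt at htail
        cases hr : t.reverse with
        | nil => simpa using congrArg List.reverse hr
        | cons z t' => rw [hr] at htail; simp at htail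
      subst htnil
      rw [bStep_getLast_none _ _ ht]
      simp [tailRunOpt]
    | some g =>
      obtain ⟨k', c⟩ := g
      have htail : tailRunOpt t = some (k', c) := by rw [← ih, ht]
      unfold tailRunOpt at htail
      cases hr : t.reverse with
      | nil => rw [hr] at htail; simp at htail
      | cons z t' =>
        rw [hr] at htail
        simp only [Option.some.injEq, Prod.mk.injEq] at htail
        obtain ⟨hk', hc⟩ := htail
        rw [bStep_getLast_some _ _ _ _ ht]
        unfold tailRunOpt
        rw [List.reverse_append, List.reverse_singleton, List.singleton_append, hr]
        by_cases heq : k' = classify y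
        · -- classify z = classify y : the new element extends the trailing run
          have hpz : classify z = classify y := hk' ▸ heq
          rw [if_pos heq]
          show some (classify y, c + 1)
              = some (classify y, 1 + (((z :: t').takeWhile fun w => classify w == classify y).length : Int))
          rw [List.takeWhile_cons_of_pos (by simp [hpz])]
          simp only [Option.some.injEq, Prod.mk.injEq, List.length_cons]
          refine ⟨trivial, ?_⟩
          rw [← hpz]
          push_cast at hc ⊢
          omega
        · -- a different classification starts a new trailing run of length 1
          have hpz : ¬ classify z = classify y := fun h => heq (hk' ▸ h)
          rw [if_neg heq]
          show some (classify y, 1)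
              = some (classify y, 1 + (((z :: t').takeWhile fun w => classify w == classify y).length : Int))
          rw [List.takeWhile_cons_of_neg (by simp [hpz])]
          simp

-- ===== VERDICT (by name: the statement is the Claim_ definition above) =====
theorem detect_streak_spec : Claim_equal_detect_streak := by
  intro numbers _
  unfold Spec_detect_streak
  cases hrev : numbers.reverse with
  | nil =>
    have hnil : numbers = [] := by simpa using congrArg List.reverse hrev
    subst hnil
    rfl
  | cons y t =>
    have hn : numbers = t.reverse ++ [y] := by simpa using congrArg List.reverse hrev
    have hb : detect_streak_alt numbers
        = (some (classify y), 1 + ((t.takeWhile fun z => classify z == classify y).length : Int)) := by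
      unfold detect_streak_alt
      rw [bFold_spec]
      unfold tailRunOpt
      rw [hrev]
    have hne : numbers.isEmpty = false := by rw [hn]; simp
    have hlast : PySem.List.pyGet? numbers (-1) = some y := by
      rw [PySem.List.pyGet?_neg_one, hn, List.getLast?_concat]
    have hlen : ((numbers.length : Int)) - 2 = (t.length : Int) - 1 := by
      rw [hn]; simp; omega
    simp only [detect_streak, hne, Bool.false_eq_true, if_false, hlast, Option.getD_some]
    rw [hb, hlen, hn, aLoop_spec t [y] (classify y) 1]
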